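-- pv_equiv track=rewrite | github.com/justintucker1/interview-questions | hw/max-zeros-by-flipping.py | getMaxZeros
-- ===== SOURCE A (Python) =====
-- def getMaxZeros(bits):
--     l = r = zero_count = max_ones = 0
--     while r < len(bits):
--         if bits[r] == 0:
--             zero_count += 1
--             r += 1
--             l = r
--         else:
--             max_ones = max(max_ones, r - l + 1)
--             r += 1
--     return zero_count + max_ones
-- ===== SOURCE B (Python) =====
-- def getMaxZeros(bits):
--     zeros = bits.count(0)
--     # run-length encode bits by the key (b == 0)
--     groups = []
--     prev = None
--     n = 0
--     for b in bits:
--         key = (b == 0)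
--         if key == prev:
--             n += 1
--         else:
--             if prev is not None:
--                 groups.append((prev, n))
--             prev, n = key, 1
--     if prev is not None:
--         groups.append((prev, n))
--     runs = [c for k, c in groups if not k]
--     return zeros + max(runs, default=0)
-- ===== Notes on version B (the rewrite author's own statement) =====
-- stated objective: alternative
-- what changed: Replaced the single two-pointer scan by two independent passes: a builtin count of zeros plus a run-length encoding of the list whose longest non-zero run is taken with max(..., default=0).
import Mathlib
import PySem

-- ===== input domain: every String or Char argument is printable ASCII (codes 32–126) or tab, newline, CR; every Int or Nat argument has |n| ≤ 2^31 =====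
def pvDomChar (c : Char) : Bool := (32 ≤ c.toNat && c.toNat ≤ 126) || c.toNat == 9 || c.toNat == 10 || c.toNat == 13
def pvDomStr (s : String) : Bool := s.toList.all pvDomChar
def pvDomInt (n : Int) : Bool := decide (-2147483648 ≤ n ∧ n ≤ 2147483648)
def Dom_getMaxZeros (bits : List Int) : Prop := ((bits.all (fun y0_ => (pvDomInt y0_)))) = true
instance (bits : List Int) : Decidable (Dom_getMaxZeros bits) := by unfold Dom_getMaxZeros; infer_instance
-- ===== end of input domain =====

-- B replaces A's single two-pointer scan by two passes: count(0) plus the longest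
-- non-zero run taken from a run-length encoding ('alternative' objective, same cost).

-- ===== PORT A =====
-- the while loop of A: state (l, r, zero_count, max_ones)
def getMaxZerosLoop (bits : List Int) (l r : Nat) (zc mo : Int) : Int :=
  if h : r < bits.length then
    if bits[r] = 0 then
      getMaxZerosLoop bits (r + 1) (r + 1) (zc + 1) mo
    else
      getMaxZerosLoop bits l (r + 1) zc (max mo ((r : Int) - (l : Int) + 1))
  else
    zc + mo
termination_by bits.length - r

def getMaxZeros (bits : List Int) : Int :=
  getMaxZerosLoop bits 0 0 0 0

-- ===== PORT B =====
-- the run-length-encoding loop of Source B: current group (prev, n), flushed on key change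
def rleAux (prev : Bool) (n : Int) : List Int → List (Bool × Int)
  | [] => [(prev, n)]
  | b :: xs =>
    if (decide (b = 0)) = prev then rleAux prev (n + 1) xs
    else (prev, n) :: rleAux (decide (b = 0)) 1 xs

def rleGroups : List Int → List (Bool × Int)
  | [] => []
  | b :: xs => rleAux (decide (b = 0)) 1 xs

-- max(runs, default=0)
def pyMaxD0 (xs : List Int) : Int :=
  match xs with
  | [] => 0
  | h :: t => t.foldl max h

def getMaxZeros_alt (bits : List Int) : Int :=
  let zeros : Int := (PySem.List.count bits 0 : Int)
  let runs : List Int := (rleGroups bits).filterMap (fun p => if p.1 then none else some p.2)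
  zeros + pyMaxD0 runs

-- ===== PRECONDITION & SPEC =====
def Spec_getMaxZeros (bits : List Int) (out : Int) : Prop := out = getMaxZeros_alt bits
instance (bits : List Int) (out : Int) : Decidable (Spec_getMaxZeros bits out) := by unfold Spec_getMaxZeros; infer_instance

-- ===== CLAIM (what is proved, stated in full; the proofs are below) =====
def Claim_equal_getMaxZeros : Prop := ∀ (bits : List Int), Dom_getMaxZeros bits → Spec_getMaxZeros bits (getMaxZeros bits)

-- ===== LEMMAS AND PROOFS =====

-- best run value reachable from a current run of length cur
def bestFrom (cur : Int) : List Int → Int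
  | [] => cur
  | b :: xs => if b = 0 then max cur (bestFrom 0 xs) else bestFrom (cur + 1) xs

theorem bestFrom_ge (xs : List Int) : ∀ cur : Int, cur ≤ bestFrom cur xs := by
  induction xs with
  | nil => intro cur; simp [bestFrom]
  | cons b xs ih =>
    intro cur
    simp only [bestFrom]
    split
    · exact le_max_left _ _
    · exact le_trans (by omega) (ih (cur + 1))

theorem loopA_eq (bits : List Int) : ∀ k r l zc mo, bits.length - r ≤ k → l ≤ r →
    ((r : Int) - (l : Int) ≤ mo) →
    getMaxZerosLoop bits l r zc mo
      = zc + ((bits.drop r).count 0 : Int) + max mo (bestFrom ((r : Int) - (l : Int)) (bits.drop r)) := by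
  intro k
  induction k with
  | zero =>
    intro r l zc mo hk hlr hm
    have hr : ¬ r < bits.length := by omega
    rw [getMaxZerosLoop]
    simp [hr, List.drop_of_length_le (by omega : bits.length ≤ r), bestFrom]
    omega
  | succ k ih =>
    intro r l zc mo hk hlr hm
    rw [getMaxZerosLoop]
    by_cases hr : r < bits.length
    · have hdrop : bits.drop r = bits[r] :: bits.drop (r + 1) := List.drop_eq_getElem_cons hr
      simp only [hr, dif_pos]
      by_cases hz : bits[r] = 0
      · rw [if_pos hz, ih (r+1) (r+1) (zc+1) mo (by omega) le_rfl (by push_cast; omega)]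
        rw [hdrop, hz]
        have hz0 : ((r + 1 : Nat) : Int) - ((r + 1 : Nat) : Int) = 0 := sub_self _
        rw [hz0]
        simp only [List.count_cons, bestFrom, beq_self_eq_true, if_true]
        have hge := bestFrom_ge (bits.drop (r+1)) (0 : Int)
        push_cast
        omega
      · rw [if_neg hz, ih (r+1) l zc _ (by omega) (by omega) (by push_cast; omega)]
        rw [hdrop]
        have harith : ((r + 1 : Nat) : Int) - (l : Int) = ((r : Int) - (l : Int)) + 1 := by
          push_cast; ring
        rw [harith]
        simp only [List.count_cons, beq_iff_eq, bestFrom, hz, if_false, Nat.add_zero]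
        have hge := bestFrom_ge (bits.drop (r+1)) (((r : Int) - (l : Int)) + 1)
        omega
    · simp only [hr, dif_neg, not_false_iff]
      simp [List.drop_of_length_le (by omega : bits.length ≤ r), bestFrom]
      omega

theorem fm_cons_false (n : Int) (L : List (Bool × Int)) :
    List.filterMap (fun p => if p.1 then none else some p.2) (((false, n) : Bool × Int) :: L)
      = n :: L.filterMap (fun p => if p.1 then none else some p.2) := by simp

theorem fm_cons_true (n : Int) (L : List (Bool × Int)) :
    List.filterMap (fun p => if p.1 then none else some p.2) (((true, n) : Bool × Int) :: L)
      = L.filterMap (fun p => if p.1 then none else some p.2) := by simp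

-- the RLE fold of B computes bestFrom
theorem rleAux_fold (xs : List Int) : ∀ n m : Int, 0 ≤ m → 1 ≤ n →
    (((rleAux false n xs).filterMap (fun p => if p.1 then none else some p.2)).foldl max m
        = max m (bestFrom n xs))
  ∧ (((rleAux true n xs).filterMap (fun p => if p.1 then none else some p.2)).foldl max m
        = max m (bestFrom 0 xs)) := by
  induction xs with
  | nil =>
    intro n m hm hn
    constructor
    · simp [rleAux, bestFrom]
    · simp [rleAux, bestFrom]; omega
  | cons b xs ih =>
    intro n m hm hn
    by_cases hb : b = 0
    · have hkey : (decide (b = 0)) = true := by simp [hb]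
      constructor
      · rw [rleAux, hkey, if_neg (by decide : ¬ ((true : Bool) = false))]
        rw [fm_cons_false]
        rw [List.foldl_cons, (ih 1 (max m n) (le_trans hm (le_max_left _ _)) le_rfl).2]
        simp only [bestFrom, if_pos hb]
        have := bestFrom_ge xs (0 : Int)
        omega
      · rw [rleAux, hkey, if_pos rfl]
        rw [(ih (n+1) m hm (by omega)).2]
        simp only [bestFrom, if_pos hb]
        have := bestFrom_ge xs (0 : Int)
        omega
    · have hkey : (decide (b = 0)) = false := by simp [hb]
      constructor
      · rw [rleAux, hkey, if_pos rfl]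
        rw [(ih (n+1) m hm (by omega)).1]
        simp only [bestFrom, if_neg hb]
      · rw [rleAux, hkey, if_neg (by decide : ¬ ((false : Bool) = true))]
        rw [fm_cons_true, (ih 1 m hm le_rfl).1]
        simp only [bestFrom, if_neg hb, zero_add]

-- every run length produced is ≥ 1, so Python's max(runs, default=0) equals foldl max 0
theorem rleAux_runs_pos (xs : List Int) : ∀ (k : Bool) (n : Int), 1 ≤ n →
    ∀ c ∈ (rleAux k n xs).filterMap (fun p => if p.1 then none else some p.2), 1 ≤ c := by
  induction xs with
  | nil =>
    intro k n hn c hc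
    cases k <;> simp_all [rleAux]
  | cons b xs ih =>
    intro k n hn c hc
    rw [rleAux] at hc
    split at hc
    · exact ih k (n+1) (by omega) c hc
    · cases k with
      | false =>
        rw [fm_cons_false] at hc
        rcases List.mem_cons.mp hc with h | h
        · omega
        · exact ih _ 1 le_rfl c h
      | true =>
        rw [fm_cons_true] at hc
        exact ih _ 1 le_rfl c hc

theorem pyMaxD0_eq_foldl (xs : List Int) (hpos : ∀ c ∈ xs, 1 ≤ c) :
    pyMaxD0 xs = xs.foldl max 0 := by
  cases xs with
  | nil => simp [pyMaxD0]
  | cons h t =>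
    have h1 : max (0 : Int) h = h := by
      have := hpos h (List.mem_cons_self ..); omega
    simp [pyMaxD0, h1]

theorem alt_eq (bits : List Int) :
    getMaxZeros_alt bits = (bits.count 0 : Int) + bestFrom 0 bits := by
  unfold getMaxZeros_alt
  rw [PySem.List.count_eq]
  cases bits with
  | nil => simp [rleGroups, pyMaxD0, bestFrom]
  | cons b xs =>
    simp only [rleGroups]
    rw [pyMaxD0_eq_foldl _ (rleAux_runs_pos xs _ 1 le_rfl)]
    by_cases hb : b = 0
    · have hkey : (decide (b = 0)) = true := by simp [hb]
      rw [hkey, (rleAux_fold xs 1 0 le_rfl le_rfl).2]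
      simp only [bestFrom, if_pos hb]
    · have hkey : (decide (b = 0)) = false := by simp [hb]
      rw [hkey, (rleAux_fold xs 1 0 le_rfl le_rfl).1]
      simp only [bestFrom, if_neg hb, zero_add]
      have := bestFrom_ge xs (1 : Int)
      omega

-- ===== VERDICT (by name: the statement is the Claim_ definition above) =====
theorem getMaxZeros_spec : Claim_equal_getMaxZeros := by
  intro bits _
  unfold Spec_getMaxZeros getMaxZeros
  rw [loopA_eq bits bits.length 0 0 0 0 (by omega) le_rfl (by simp), alt_eq]
  have := bestFrom_ge bits (0 : Int)
  simp only [List.drop_zero, Nat.cast_zero, sub_zero]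
  omega
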